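-- pv_equiv track=rewrite | github.com/oceanbase/obdeploy | plugins/oceanbase/4.2.1.4/takeover.py | get_global_key_value
-- ===== SOURCE A (Python) =====
-- def get_global_key_value(ips_data):
--     key_values_map = {}
--     server_num = len(ips_data)
--     for data in ips_data.values():
--         for k, v in data.items():
--             if k not in key_values_map:
--                 key_values_map[k] = [v, 1]
--             elif key_values_map[k][0] == v:
--                 key_values_map[k][1] += 1
--     common_key_values = {k: v[0] for k, v in key_values_map.items() if v[1] == server_num}
--     return common_key_values
-- ===== SOURCE B (Python) =====
-- def get_global_key_value(ips_data):
--     servers = list(ips_data.values())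
--     if not servers:
--         return {}
--     candidate = dict(servers[0])
--     for server in servers[1:]:
--         candidate = {k: v for k, v in candidate.items() if k in server and server[k] == v}
--     return candidate
-- ===== Notes on version B (the rewrite author's own statement) =====
-- stated objective: alternative
-- what changed: Replaces the global per-key (first-value, match-count) map and final count==server_num filter by a shrinking candidate dict: start from the first server's dict and intersect it with each remaining server, keeping keys present with an equal value.
import Mathlib
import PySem

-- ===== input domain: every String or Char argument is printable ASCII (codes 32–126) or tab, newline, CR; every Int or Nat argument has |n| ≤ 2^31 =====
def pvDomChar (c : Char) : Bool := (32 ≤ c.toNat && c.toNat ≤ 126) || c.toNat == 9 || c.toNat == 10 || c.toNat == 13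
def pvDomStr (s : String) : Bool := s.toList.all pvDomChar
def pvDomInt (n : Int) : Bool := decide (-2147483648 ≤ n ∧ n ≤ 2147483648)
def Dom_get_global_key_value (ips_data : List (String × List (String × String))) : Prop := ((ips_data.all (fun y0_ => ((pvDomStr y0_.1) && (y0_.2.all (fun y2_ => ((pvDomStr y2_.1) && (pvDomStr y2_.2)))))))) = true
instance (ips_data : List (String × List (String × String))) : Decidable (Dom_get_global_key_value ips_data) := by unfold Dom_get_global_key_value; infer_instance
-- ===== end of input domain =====

-- B replaces A's global per-key (first-value, count) map by intersecting server dicts into a shrinking candidate; alternative decomposition, same cost.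


-- ===== PORT A =====
-- one iteration of A's inner loop body (`for k, v in data.items(): …`)
def kvStep (m : PySem.Dict String (String × Int)) (kv : String × String) :
    PySem.Dict String (String × Int) :=
  match m.get? kv.1 with
  | none => m.insert kv.1 (kv.2, 1)                                   -- k not in key_values_map
  | some p => if p.1 = kv.2 then m.insert kv.1 (p.1, p.2 + 1) else m  -- key_values_map[k][1] += 1 (in-place)

def get_global_key_value (ips_data : List (String × List (String × String))) : List (String × String) :=
  let key_values_map :=
    ips_data.foldl (fun m data => data.2.foldl kvStep m) PySem.Dict.empty
  let server_num : Int := PySem.List.len ips_data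
  -- dict comprehension {k: v[0] for k, v in …items() if v[1] == server_num}: exact as
  -- filter+map because key_values_map's keys are distinct (Dict built from empty)
  (key_values_map.items.filter (fun p => p.2.2 == server_num)).map (fun p => (p.1, p.2.1))

-- ===== PORT B =====
def get_global_key_value_alt (ips_data : List (String × List (String × String))) : List (String × String) :=
  match ips_data with
  | [] => []
  | first :: rest =>
      rest.foldl
        (fun candidate server =>
          candidate.filter (fun kv => (PySem.Dict.mk server.2).get? kv.1 == some kv.2))
        first.2

-- ===== PRECONDITION & SPEC =====
-- Pre_ excludes association lists in which some server's key list has duplicates: such lists do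
-- not represent Python dicts (A's parameter is dict[str, dict[str, str]]), so A never receives them.
def Pre_get_global_key_value (ips_data : List (String × List (String × String))) : Prop :=
  ∀ p ∈ ips_data, (p.2.map Prod.fst).Nodup
instance (ips_data : List (String × List (String × String))) : Decidable (Pre_get_global_key_value ips_data) := by
  unfold Pre_get_global_key_value; infer_instance
def pvWitness_get_global_key_value : (List (String × List (String × String))) :=
  [("s1", [("a", "x"), ("b", "y")]), ("s2", [("a", "x")])]
def Spec_get_global_key_value (ips_data : List (String × List (String × String))) (out : List (String × String)) : Prop := out = get_global_key_value_alt ips_data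
instance (ips_data : List (String × List (String × String))) (out : List (String × String)) : Decidable (Spec_get_global_key_value ips_data out) := by unfold Spec_get_global_key_value; infer_instance

-- ===== CLAIM (what is proved, stated in full; the proofs are below) =====
def Claim_equal_get_global_key_value : Prop := ∀ (ips_data : List (String × List (String × String))), Dom_get_global_key_value ips_data → Pre_get_global_key_value ips_data → Spec_get_global_key_value ips_data (get_global_key_value ips_data)

-- ===== LEMMAS AND PROOFS =====

theorem nodup_keys_kvStep (m : PySem.Dict String (String × Int)) (kv : String × String)
    (hm : m.keys.Nodup) : (kvStep m kv).keys.Nodup := by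
  unfold kvStep
  cases h : m.get? kv.1 with
  | none =>
    have hc : m.contains kv.1 = false := by
      rw [PySem.Dict.contains_eq_isSome_get?, h]; rfl
    rw [PySem.Dict.keys_insert_of_not_contains _ _ hc]
    have hnm : kv.1 ∉ m.keys := (PySem.Dict.get?_eq_none_iff_not_mem_keys _ _).mp h
    exact hm.append (List.nodup_singleton _) (List.disjoint_singleton.mpr hnm)
  | some p =>
    have hc : m.contains kv.1 = true := by
      rw [PySem.Dict.contains_eq_isSome_get?, h]; rfl
    by_cases hp : p.1 = kv.2
    · simp only [hp, if_true]
      rw [PySem.Dict.keys_insert_of_contains _ _ hc]; exact hm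
    · simpa [hp] using hm

theorem kvStep_of_none {m : PySem.Dict String (String × Int)} {kv : String × String}
    (h : m.get? kv.1 = none) : kvStep m kv = m.insert kv.1 (kv.2, 1) := by
  unfold kvStep; rw [h]

theorem kvStep_of_some_eq {m : PySem.Dict String (String × Int)} {kv : String × String}
    {p : String × Int} (h : m.get? kv.1 = some p) (hp : p.1 = kv.2) :
    kvStep m kv = m.insert kv.1 (p.1, p.2 + 1) := by
  unfold kvStep; rw [h]; simp [hp]

theorem kvStep_of_some_ne {m : PySem.Dict String (String × Int)} {kv : String × String}
    {p : String × Int} (h : m.get? kv.1 = some p) (hp : ¬ p.1 = kv.2) :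
    kvStep m kv = m := by
  unfold kvStep; rw [h]; simp [hp]

def bump (d : List (String × String)) (q : String × (String × Int)) : String × (String × Int) :=
  if (q.1, q.2.1) ∈ d then (q.1, (q.2.1, q.2.2 + 1)) else q

theorem foldl_kvStep_items (d : List (String × String)) (m : PySem.Dict String (String × Int))
    (hm : m.keys.Nodup) (hd : (d.map Prod.fst).Nodup) :
    (d.foldl kvStep m).items
      = m.items.map (bump d)
        ++ (d.filter (fun kv => !(m.contains kv.1))).map (fun kv => (kv.1, (kv.2, (1 : Int)))) := by
  induction d generalizing m with
  | nil =>
    have hb : ∀ q, bump [] q = q := fun q => by simp [bump]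
    simp only [List.foldl_nil, List.filter_nil, List.map_nil, List.append_nil]
    rw [List.map_congr_left (fun q _ => hb q)]
    simp
  | cons kv d' ih =>
    simp only [List.map_cons, List.nodup_cons] at hd
    obtain ⟨hk1, hd'⟩ := hd
    have hk1' : ∀ v : String, (kv.1, v) ∉ d' := by
      intro v hv
      exact hk1 (List.mem_map.mpr ⟨(kv.1, v), hv, rfl⟩)
    have hmemiff : ∀ q : String × (String × Int), q.1 ≠ kv.1 →
        (((q.1, q.2.1) ∈ kv :: d') ↔ ((q.1, q.2.1) ∈ d')) := by
      intro q hq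
      constructor
      · intro hmem
        rcases List.mem_cons.mp hmem with h1 | h1
        · exact absurd (congrArg Prod.fst h1) hq
        · exact h1
      · exact fun h1 => List.mem_cons_of_mem _ h1
    have hfiltercongr : ∀ (mm : PySem.Dict String (String × Int)),
        (∀ x : String, mm.contains x = (x == kv.1 || m.contains x)) →
        d'.filter (fun p => !(mm.contains p.1)) = d'.filter (fun p => !(m.contains p.1)) := by
      intro mm hmm
      apply List.filter_congr
      intro p hp
      have hne : p.1 ≠ kv.1 := by
        intro he
        exact hk1 (List.mem_map.mpr ⟨p, hp, he⟩)
      simp [hmm, hne]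
    rw [List.foldl_cons]
    cases h : m.get? kv.1 with
    | none =>
      have hc : m.contains kv.1 = false := by
        rw [PySem.Dict.contains_eq_isSome_get?, h]; rfl
      have hnm : kv.1 ∉ m.keys := (PySem.Dict.get?_eq_none_iff_not_mem_keys _ _).mp h
      rw [kvStep_of_none h]
      have hm1 : (m.insert kv.1 (kv.2, 1)).keys.Nodup := by
        rw [PySem.Dict.keys_insert_of_not_contains _ _ hc]
        exact hm.append (List.nodup_singleton _) (List.disjoint_singleton.mpr hnm)
      rw [ih _ hm1 hd']
      rw [PySem.Dict.items_insert_of_not_contains _ _ hc]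
      rw [hfiltercongr _ (fun x => by rw [PySem.Dict.contains_insert])]
      have hmap : m.items.map (bump d') = m.items.map (bump (kv :: d')) := by
        apply List.map_congr_left
        intro q hq
        have hqk : q.1 ≠ kv.1 := by
          intro he
          exact hnm (he ▸ PySem.Dict.mem_keys_of_mem_items _ hq)
        unfold bump
        rw [if_congr (hmemiff q hqk) rfl rfl]
      have hbump0 : bump d' (kv.1, (kv.2, (1:Int))) = (kv.1, (kv.2, (1:Int))) := by
        unfold bump
        simp [hk1' kv.2]
      rw [List.map_append, hmap, List.map_singleton, hbump0]
      rw [List.filter_cons_of_pos (by simp [hc])]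
      simp
    | some p =>
      have hc : m.contains kv.1 = true := by
        rw [PySem.Dict.contains_eq_isSome_get?, h]; rfl
      by_cases hp : p.1 = kv.2
      · rw [kvStep_of_some_eq h hp]
        have hm1 : (m.insert kv.1 (p.1, p.2 + 1)).keys.Nodup := by
          rw [PySem.Dict.keys_insert_of_contains _ _ hc]; exact hm
        rw [ih _ hm1 hd']
        rw [PySem.Dict.items_insert_of_contains _ _ hc]
        rw [hfiltercongr _ (fun x => by rw [PySem.Dict.contains_insert])]
        rw [List.map_map]
        have hmap : m.items.map (bump d' ∘ fun q => if (q.1 == kv.1) = true then (kv.1, (p.1, p.2 + 1)) else q)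
            = m.items.map (bump (kv :: d')) := by
          apply List.map_congr_left
          intro q hq
          simp only [Function.comp]
          cases hx : q.1 == kv.1 with
          | false =>
            have hqk : q.1 ≠ kv.1 := by
              intro he; rw [he] at hx; simp at hx
            rw [if_neg (by simp)]
            unfold bump
            rw [if_congr (hmemiff q hqk) rfl rfl]
          | true =>
            have hqe : q.1 = kv.1 := eq_of_beq hx
            have hq2 : q.2 = p := by
              have : m.get? q.1 = some q.2 :=
                (PySem.Dict.get?_eq_some_iff_mem_items _ _ _ hm).mpr (by
                  rcases q with ⟨a, b⟩; exact hq)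
              rw [hqe, h] at this
              exact (Option.some_injective _ this).symm
            have hq' : q = (kv.1, p) := by
              rcases q with ⟨a, b⟩
              simp only at hqe hq2
              rw [hqe, hq2]
            have h1 : ((kv.1 : String), (p.1 : String)) = kv := by
              rcases kv with ⟨k1, k2⟩
              simp only at hp ⊢
              simp [hp]
            have hin2 : ((kv.1, p.1) : String × String) ∈ kv :: d' := by
              rw [h1]; exact List.mem_cons_self
            rw [hq']
            rw [if_pos (by simp)]
            simp [bump, hin2, hk1' p.1]
        rw [hmap]
        rw [List.filter_cons_of_neg (by simp [hc])]
      · rw [kvStep_of_some_ne h hp]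
        rw [ih _ hm hd']
        rw [List.filter_cons_of_neg (by simp [hc])]
        have hmap : m.items.map (bump d') = m.items.map (bump (kv :: d')) := by
          apply List.map_congr_left
          intro q hq
          cases hx : q.1 == kv.1 with
          | false =>
            have hqk : q.1 ≠ kv.1 := by intro he; rw [he] at hx; simp at hx
            unfold bump
            rw [if_congr (hmemiff q hqk) rfl rfl]
          | true =>
            have hqe : q.1 = kv.1 := eq_of_beq hx
            have hq2 : q.2 = p := by
              have : m.get? q.1 = some q.2 :=
                (PySem.Dict.get?_eq_some_iff_mem_items _ _ _ hm).mpr (by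
                  rcases q with ⟨a, b⟩; exact hq)
              rw [hqe, h] at this
              exact (Option.some_injective _ this).symm
            have hnotin1 : ¬ (((q.1, q.2.1) : String × String) ∈ d') := by
              rw [hqe]; exact hk1' _
            have hnotin2 : ¬ (((q.1, q.2.1) : String × String) ∈ kv :: d') := by
              intro hmem
              rcases List.mem_cons.mp hmem with h1 | h1
              · apply hp
                have := congrArg Prod.snd h1
                simp at this
                rw [← this, hq2]
              · exact hnotin1 h1
            unfold bump
            rw [if_neg hnotin1, if_neg hnotin2]
        rw [hmap]

theorem nodup_keys_foldl_kvStep (d : List (String × String)) (m : PySem.Dict String (String × Int))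
    (hm : m.keys.Nodup) : (d.foldl kvStep m).keys.Nodup := by
  induction d generalizing m with
  | nil => exact hm
  | cons kv d' ih => exact ih _ (nodup_keys_kvStep m kv hm)

theorem counts_foldl_kvStep (d : List (String × String)) (m : PySem.Dict String (String × Int))
    (i : Nat) (hm : m.keys.Nodup) (hd : (d.map Prod.fst).Nodup)
    (hcnt : ∀ q ∈ m.items, 1 ≤ q.2.2 ∧ q.2.2 ≤ (i : Int)) :
    ∀ q ∈ (d.foldl kvStep m).items, 1 ≤ q.2.2 ∧ q.2.2 ≤ (i : Int) + 1 := by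
  intro q hq
  rw [foldl_kvStep_items d m hm hd] at hq
  rcases List.mem_append.mp hq with h1 | h1
  · rcases List.mem_map.mp h1 with ⟨r, hr, hrq⟩
    have := hcnt r hr
    by_cases hmem : (r.1, r.2.1) ∈ d
    · rw [← hrq]; simp only [bump, if_pos hmem]; constructor <;> [omega; omega]
    · rw [← hrq]; simp only [bump, if_neg hmem]; omega
  · rcases List.mem_map.mp h1 with ⟨r, hr, hrq⟩
    rw [← hrq]
    refine ⟨by simp, ?_⟩
    have h1r : ((r.1, (r.2, (1 : Int))).2.2) = 1 := rfl
    rw [h1r]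
    omega

theorem filter_step (d : List (String × String)) (m : PySem.Dict String (String × Int))
    (i : Nat) (hm : m.keys.Nodup) (hd : (d.map Prod.fst).Nodup) (hi : 1 ≤ i)
    (hcnt : ∀ q ∈ m.items, 1 ≤ q.2.2 ∧ q.2.2 ≤ (i : Int)) :
    ((d.foldl kvStep m).items.filter (fun p => p.2.2 == ((i : Int) + 1))).map (fun p => (p.1, p.2.1))
      = ((m.items.filter (fun p => p.2.2 == (i : Int))).map (fun p => (p.1, p.2.1))).filter
          (fun kv => (PySem.Dict.mk d).get? kv.1 == some kv.2) := by
  rw [foldl_kvStep_items d m hm hd, List.filter_append, List.map_append]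
  have hfresh : ((d.filter (fun kv => !(m.contains kv.1))).map
      (fun kv => (kv.1, (kv.2, (1 : Int))))).filter (fun p => p.2.2 == ((i : Int) + 1)) = [] := by
    rw [List.filter_eq_nil_iff]
    intro a ha
    rcases List.mem_map.mp ha with ⟨r, _, hrq⟩
    rw [← hrq]
    simp only [beq_iff_eq]
    simp
    omega
  rw [hfresh, List.map_nil, List.append_nil]
  rw [List.filter_map]
  have hcongr : ∀ q ∈ m.items,
      ((fun p => p.2.2 == ((i : Int) + 1)) ∘ bump d) q
        = ((q.2.2 == (i : Int)) && decide ((q.1, q.2.1) ∈ d)) := by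
    intro q hq
    have hb := hcnt q hq
    by_cases hmem : (q.1, q.2.1) ∈ d
    · by_cases hqe : q.2.2 = (i : Int)
      · simp [Function.comp, bump, hmem, hqe]
      · have hne : ¬ (q.2.2 + 1 = (i : Int) + 1) := by omega
        simp [Function.comp, bump, hmem, hqe, hne]
    · have hne : ¬ (q.2.2 = (i : Int) + 1) := by omega
      simp [Function.comp, bump, hmem, hne]
  rw [List.filter_congr hcongr, List.map_map]
  have hproj : ∀ q ∈ m.items.filter (fun q => (q.2.2 == (i : Int)) && decide ((q.1, q.2.1) ∈ d)),
      ((fun p : String × (String × Int) => (p.1, p.2.1)) ∘ bump d) q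
        = (fun p : String × (String × Int) => (p.1, p.2.1)) q := by
    intro q hq
    have hmem : (q.1, q.2.1) ∈ d := by
      have := (List.mem_filter.mp hq).2
      simp at this
      exact this.2
    simp [Function.comp, bump, hmem]
  rw [List.map_congr_left hproj]
  rw [List.filter_map]
  rw [List.filter_filter]
  apply congrArg
  apply List.filter_congr
  intro q hq
  have hkeys : (PySem.Dict.mk d).keys.Nodup := by
    simpa [PySem.Dict.keys] using hd
  have hiff := PySem.Dict.get?_eq_some_iff_mem_items (PySem.Dict.mk d) q.1 q.2.1 hkeys
  have hitems : (PySem.Dict.mk d).items = d := rfl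
  rw [hitems] at hiff
  have hbeq : ((PySem.Dict.mk d).get? q.1 == some q.2.1) = decide ((q.1, q.2.1) ∈ d) := by
    rw [beq_eq_decide]
    rw [decide_eq_decide]
    exact hiff
  simp only [Function.comp]
  rw [hbeq, Bool.and_comm]

theorem main_invariant (rest : List (String × List (String × String)))
    (m : PySem.Dict String (String × Int)) (c : List (String × String)) (i : Nat) (N : Int)
    (hm : m.keys.Nodup) (hi : 1 ≤ i) (hN : N = (i : Int) + rest.length)
    (hcnt : ∀ q ∈ m.items, 1 ≤ q.2.2 ∧ q.2.2 ≤ (i : Int))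
    (hc : (m.items.filter (fun p => p.2.2 == (i : Int))).map (fun p => (p.1, p.2.1)) = c)
    (hrest : ∀ sd ∈ rest, (sd.2.map Prod.fst).Nodup) :
    ((rest.foldl (fun m data => data.2.foldl kvStep m) m).items.filter
        (fun p => p.2.2 == N)).map (fun p => (p.1, p.2.1))
      = rest.foldl
          (fun candidate server =>
            candidate.filter (fun kv => (PySem.Dict.mk server.2).get? kv.1 == some kv.2))
          c := by
  induction rest generalizing m c i with
  | nil =>
    simp only [List.length_nil, Nat.cast_zero, add_zero] at hN
    rw [hN] at *
    simpa using hc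
  | cons sd rest' ih =>
    rw [List.foldl_cons, List.foldl_cons]
    have hd : (sd.2.map Prod.fst).Nodup := hrest sd List.mem_cons_self
    have hstep := filter_step sd.2 m i hm hd hi hcnt
    rw [hc] at hstep
    have hcast : ((i : Int) + 1) = ((i + 1 : Nat) : Int) := by push_cast; ring
    rw [hcast] at hstep
    exact ih (sd.2.foldl kvStep m) _ (i + 1)
      (nodup_keys_foldl_kvStep sd.2 m hm) (by omega)
      (by simp only [List.length_cons] at hN; push_cast at hN ⊢; omega)
      (by
        have := counts_foldl_kvStep sd.2 m i hm hd hcnt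
        intro q hq
        have h2 := this q hq
        push_cast
        omega)
      hstep
      (fun x hx => hrest x (List.mem_cons_of_mem _ hx))

-- ===== VERDICT (by name: the statement is the Claim_ definition above) =====
theorem get_global_key_value_spec : Claim_equal_get_global_key_value := by
  intro ips_data _hdom hpre
  unfold Spec_get_global_key_value
  cases ips_data with
  | nil => rfl
  | cons first rest =>
    simp only [get_global_key_value, get_global_key_value_alt, List.foldl_cons]
    have hd1 : (first.2.map Prod.fst).Nodup := hpre first List.mem_cons_self
    have hempty : (PySem.Dict.empty : PySem.Dict String (String × Int)).keys.Nodup := by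
      simp [PySem.Dict.keys_empty]
    have hitems : (first.2.foldl kvStep PySem.Dict.empty).items
        = first.2.map (fun kv => (kv.1, (kv.2, (1 : Int)))) := by
      rw [foldl_kvStep_items first.2 PySem.Dict.empty hempty hd1]
      have : (PySem.Dict.empty : PySem.Dict String (String × Int)).items = [] := rfl
      rw [this]
      simp [PySem.Dict.contains_empty]
    have hm0 : (first.2.foldl kvStep PySem.Dict.empty).keys.Nodup :=
      nodup_keys_foldl_kvStep _ _ hempty
    have hcnt0 : ∀ q ∈ (first.2.foldl kvStep PySem.Dict.empty).items,
        1 ≤ q.2.2 ∧ q.2.2 ≤ ((1 : Nat) : Int) := by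
      intro q hq
      rw [hitems] at hq
      rcases List.mem_map.mp hq with ⟨r, _, hrq⟩
      rw [← hrq]
      simp
    have hc0 : ((first.2.foldl kvStep PySem.Dict.empty).items.filter
          (fun p => p.2.2 == ((1 : Nat) : Int))).map (fun p => (p.1, p.2.1)) = first.2 := by
      rw [hitems, List.filter_map]
      have h1 : first.2.filter ((fun p : String × (String × Int) => p.2.2 == ((1 : Nat) : Int))
            ∘ (fun kv : String × String => (kv.1, (kv.2, (1 : Int))))) = first.2 := by
        rw [List.filter_congr (q := fun _ => true) (fun q _ => by simp [Function.comp])]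
        exact List.filter_true _
      rw [h1, List.map_map]
      have h2 : ∀ q ∈ first.2, ((fun p : String × (String × Int) => (p.1, p.2.1))
            ∘ (fun kv : String × String => (kv.1, (kv.2, (1 : Int))))) q = id q := fun q _ => rfl
      rw [List.map_congr_left h2, List.map_id]
    rw [main_invariant rest _ first.2 1 (PySem.List.len (first :: rest)) hm0 le_rfl
      (by rw [PySem.List.len_eq]; simp; ring)
      hcnt0 hc0 (fun x hx => hpre x (List.mem_cons_of_mem _ hx))]
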